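-- pv_equiv track=rewrite | github.com/j0mar03/facultyPortfolio | scripts/run_ch4_experiments.py | parse_insert_values_blob
-- ===== SOURCE A (Python) =====
-- def parse_insert_values_blob(blob):
--     rows = []
--     i = 0
--     n = len(blob)
--     while i < n:
--         while i < n and blob[i] != '(':
--             i += 1
--         if i >= n:
--             break
--         i += 1
--         row = []
--         cur = []
--         in_str = False
--         escape = False
--         while i < n:
--             ch = blob[i]
--             if in_str:
--                 if escape:
--                     cur.append(ch)
--                     escape = False
--                 elif ch == '\\':
--                     escape = True
--                 elif ch == "'":
--                     in_str = False
--                 else: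
--                     cur.append(ch)
--             else:
--                 if ch == "'":
--                     in_str = True
--                 elif ch == ',':
--                     tok = ''.join(cur).strip()
--                     row.append(tok)
--                     cur = []
--                 elif ch == ')':
--                     tok = ''.join(cur).strip()
--                     row.append(tok)
--                     rows.append(row)
--                     i += 1
--                     break
--                 else:
--                     cur.append(ch)
--             i += 1
--     return rows
-- ===== SOURCE B (Python) =====
-- # Two-phase rewrite: phase 1 extracts raw row bodies (string-aware scan to the
-- # matching top-level ')'), phase 2 tokenizes each body separately.
--
-- def _split_row(body):
--     row = []
--     cur = []
--     in_str = False
--     escape = False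
--     for ch in body:
--         if in_str:
--             if escape:
--                 cur.append(ch)
--                 escape = False
--             elif ch == '\\':
--                 escape = True
--             elif ch == "'":
--                 in_str = False
--             else:
--                 cur.append(ch)
--         else:
--             if ch == "'":
--                 in_str = True
--             elif ch == ',':
--                 row.append(''.join(cur).strip())
--                 cur = []
--             else:
--                 cur.append(ch)
--     row.append(''.join(cur).strip())
--     return row
--
--
-- def parse_insert_values_blob(blob):
--     # Phase 1: collect the raw text of each complete parenthesised row.
--     bodies = []
--     n = len(blob)
--     pos = 0
--     while True:
--         start = blob.find('(', pos)
--         if start == -1: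
--             break
--         body = []
--         in_str = False
--         escape = False
--         j = start + 1
--         closed = False
--         while j < n:
--             ch = blob[j]
--             if in_str:
--                 body.append(ch)
--                 if escape:
--                     escape = False
--                 elif ch == '\\':
--                     escape = True
--                 elif ch == "'":
--                     in_str = False
--             else:
--                 if ch == ')':
--                     closed = True
--                     break
--                 body.append(ch)
--                 if ch == "'":
--                     in_str = True
--             j += 1
--         if not closed:
--             break
--         bodies.append(''.join(body))
--         pos = j + 1
--     # Phase 2: split each body on top-level commas.
--     return [_split_row(b) for b in bodies]
-- ===== Notes on version B (the rewrite author's own statement) =====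
-- stated objective: alternative
-- what changed: A's single fused parsing loop is split into two passes: phase 1 extracts the raw text of each complete parenthesised row with a string-aware scan (seeking each opening parenthesis via str.find), phase 2 tokenizes each body separately on top-level commas.
import Mathlib
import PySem

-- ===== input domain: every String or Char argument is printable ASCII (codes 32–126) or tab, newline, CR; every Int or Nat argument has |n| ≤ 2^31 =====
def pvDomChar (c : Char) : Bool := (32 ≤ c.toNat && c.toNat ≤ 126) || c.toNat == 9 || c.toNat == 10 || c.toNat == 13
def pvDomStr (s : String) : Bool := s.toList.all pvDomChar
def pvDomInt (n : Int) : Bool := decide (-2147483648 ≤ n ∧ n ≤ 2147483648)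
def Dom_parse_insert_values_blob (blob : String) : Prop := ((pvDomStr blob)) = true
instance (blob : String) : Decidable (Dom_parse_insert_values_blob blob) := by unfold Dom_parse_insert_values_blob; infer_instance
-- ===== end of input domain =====

-- B replaces A's single fused parsing loop by two passes (extract raw row bodies,
-- then tokenize each body); an alternative decomposition of the same O(n) parse.

-- ===== PORT A =====
-- A's inner while loop: parse one row from the current position; returns the
-- finished row and the remaining input at the top-level ')', or none if the
-- input runs out first (the row is then discarded).
def pvA_inner (cs : List Char) (row : List String) (cur : List Char)
    (in_str escape : Bool) : Option (List String × List Char) :=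
  match cs with
  | [] => none
  | ch :: rest =>
    if in_str then
      if escape then pvA_inner rest row (cur ++ [ch]) in_str false
      else if ch = '\\' then pvA_inner rest row cur in_str true
      else if ch = '\'' then pvA_inner rest row cur false escape
      else pvA_inner rest row (cur ++ [ch]) in_str escape
    else
      if ch = '\'' then pvA_inner rest row cur true escape
      else if ch = ',' then
        pvA_inner rest (row ++ [String.ofList (PySem.Chars.strip cur)]) [] in_str escape
      else if ch = ')' then some (row ++ [String.ofList (PySem.Chars.strip cur)], rest)
      else pvA_inner rest row (cur ++ [ch]) in_str escape

-- needed by pvA_outer's termination (cited in decreasing_by)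
theorem pvA_inner_length : ∀ (cs : List Char) (row : List String) (cur : List Char)
    (in_str escape : Bool) (row' : List String) (rest' : List Char),
    pvA_inner cs row cur in_str escape = some (row', rest') → rest'.length < cs.length := by
  intro cs
  induction cs with
  | nil => intro _ _ _ _ _ _ h; simp [pvA_inner] at h
  | cons ch rest ih =>
    intro row cur in_str escape row' rest' h
    simp only [pvA_inner] at h
    split_ifs at h <;>
      first
        | (exact Nat.lt_succ_of_lt (ih _ _ _ _ _ _ h))
        | (cases h; simp)

-- A's outer while loop: skip to the next '(', parse one row, repeat.
def pvA_outer (cs : List Char) (rows : List (List String)) : List (List String) :=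
  match cs with
  | [] => rows
  | ch :: rest =>
    if ch = '(' then
      match hi2 : pvA_inner rest [] [] false false with
      | none => rows
      | some (row, rest') => pvA_outer rest' (rows ++ [row])
    else pvA_outer rest rows
termination_by cs.length
decreasing_by
  · exact Nat.lt_succ_of_lt (pvA_inner_length _ _ _ _ _ _ _ hi2)
  · simp

def parse_insert_values_blob (blob : String) : List (List String) :=
  pvA_outer blob.toList []

-- ===== PORT B =====
-- Phase 1 helper: copy the raw characters of one row body (string-aware) up to
-- the matching top-level ')'; none if the input ends first.
def pvB_scan (cs : List Char) (in_str escape : Bool) : Option (List Char × List Char) :=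
  match cs with
  | [] => none
  | ch :: rest =>
    if in_str then
      let s' := if escape then (true, false)
                else if ch = '\\' then (true, true)
                else if ch = '\'' then (false, false)
                else (true, false)
      match pvB_scan rest s'.1 s'.2 with
      | none => none
      | some (b, r) => some (ch :: b, r)
    else
      if ch = ')' then some ([], rest)
      else
        match pvB_scan rest (ch = '\'') false with
        | none => none
        | some (b, r) => some (ch :: b, r)

theorem pvB_scan_length : ∀ (cs : List Char) (in_str escape : Bool) (b rest' : List Char),
    pvB_scan cs in_str escape = some (b, rest') → rest'.length < cs.length := by
  intro cs
  induction cs with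
  | nil => intro _ _ _ _ h; simp [pvB_scan] at h
  | cons ch rest ih =>
    intro in_str escape b rest' h
    simp only [pvB_scan] at h
    split_ifs at h <;>
      first
        | (cases h; simp)
        | (split at h <;> [(exact absurd h (by simp));
             (cases h; exact Nat.lt_succ_of_lt (ih _ _ _ _ (by assumption)))])

-- Phase 1: the list of raw bodies of all complete rows, in order.
def pvB_findBodies (cs : List Char) : List (List Char) :=
  match cs with
  | [] => []
  | ch :: rest =>
    if ch = '(' then
      match hs : pvB_scan rest false false with
      | none => []
      | some (b, r) => b :: pvB_findBodies r
    else pvB_findBodies rest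
termination_by cs.length
decreasing_by
  · exact Nat.lt_succ_of_lt (pvB_scan_length _ _ _ _ _ hs)
  · simp

-- Phase 2: split one raw body on top-level commas (string-aware).
def pvB_splitAux (cs : List Char) (in_str escape : Bool) (cur : List Char)
    (row : List String) : List String :=
  match cs with
  | [] => row ++ [String.ofList (PySem.Chars.strip cur)]
  | ch :: rest =>
    if in_str then
      if escape then pvB_splitAux rest in_str false (cur ++ [ch]) row
      else if ch = '\\' then pvB_splitAux rest in_str true cur row
      else if ch = '\'' then pvB_splitAux rest false escape cur row
      else pvB_splitAux rest in_str escape (cur ++ [ch]) row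
    else
      if ch = '\'' then pvB_splitAux rest true escape cur row
      else if ch = ',' then
        pvB_splitAux rest in_str escape [] (row ++ [String.ofList (PySem.Chars.strip cur)])
      else pvB_splitAux rest in_str escape (cur ++ [ch]) row

def pvB_split (b : List Char) : List String := pvB_splitAux b false false [] []

def parse_insert_values_blob_alt (blob : String) : List (List String) :=
  (pvB_findBodies blob.toList).map pvB_split

-- ===== PRECONDITION & SPEC =====
def Spec_parse_insert_values_blob (blob : String) (out : List (List String)) : Prop := out = parse_insert_values_blob_alt blob
instance (blob : String) (out : List (List String)) : Decidable (Spec_parse_insert_values_blob blob out) := by unfold Spec_parse_insert_values_blob; infer_instance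

-- ===== CLAIM (what is proved, stated in full; the proofs are below) =====
def Claim_equal_parse_insert_values_blob : Prop := ∀ (blob : String), Dom_parse_insert_values_blob blob → Spec_parse_insert_values_blob blob (parse_insert_values_blob blob)

-- ===== LEMMAS AND PROOFS =====

-- A's row parser equals: scan the raw body, then re-tokenize it from the same
-- state (the invariant escape → in_str holds throughout both programs).
theorem inner_eq_scan_split : ∀ (cs : List Char) (in_str escape : Bool)
    (cur : List Char) (row : List String), (escape = true → in_str = true) →
    pvA_inner cs row cur in_str escape =
      (pvB_scan cs in_str escape).map (fun p => (pvB_splitAux p.1 in_str escape cur row, p.2)) := by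
  intro cs
  induction cs with
  | nil => intro _ _ _ _ _; rfl
  | cons ch rest ih =>
    intro in_str escape cur row hinv
    cases in_str with
    | true =>
      cases escape with
      | true =>
        simp only [pvA_inner, pvB_scan, if_true]
        rw [ih true false (cur ++ [ch]) row (fun _ => rfl)]
        cases pvB_scan rest true false <;> simp [pvB_splitAux]
      | false =>
        simp only [pvA_inner, pvB_scan, if_true, Bool.false_eq_true, if_false]
        by_cases h1 : ch = '\\'
        · simp only [if_pos h1]
          rw [ih true true cur row (fun _ => rfl)]
          cases pvB_scan rest true true <;> simp [pvB_splitAux, h1]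
        · simp only [if_neg h1]
          by_cases h2 : ch = '\''
          · simp only [if_pos h2]
            rw [ih false false cur row (fun h => absurd h (by simp))]
            cases pvB_scan rest false false <;> simp [pvB_splitAux, h2]
          · simp only [if_neg h2]
            rw [ih true false (cur ++ [ch]) row (fun _ => rfl)]
            cases pvB_scan rest true false <;> simp [pvB_splitAux, h1, h2]
    | false =>
      cases escape with
      | true => exact absurd (hinv rfl) (by simp)
      | false =>
        simp only [pvA_inner, pvB_scan, Bool.false_eq_true, if_false]
        by_cases h1 : ch = '\''
        · simp only [if_pos h1]
          have hne : ch ≠ ')' := by simp [h1]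
          simp only [if_neg hne]
          have hd : (decide (ch = '\'')) = true := by simp [h1]
          rw [hd, ih true false cur row (fun _ => rfl)]
          cases pvB_scan rest true false <;> simp [pvB_splitAux, h1]
        · simp only [if_neg h1]
          by_cases h2 : ch = ','
          · simp only [if_pos h2]
            have hne : ch ≠ ')' := by simp [h2]
            simp only [if_neg hne]
            have hd : (decide (ch = '\'')) = false := by simp [h1]
            rw [hd, ih false false [] (row ++ [String.ofList (PySem.Chars.strip cur)]) (fun h => absurd h (by simp))]
            cases pvB_scan rest false false <;> simp [pvB_splitAux, h2]
          · simp only [if_neg h2]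
            by_cases h3 : ch = ')'
            · simp [if_pos h3, pvB_splitAux]
            · simp only [if_neg h3]
              have hd : (decide (ch = '\'')) = false := by simp [h1]
              rw [hd, ih false false (cur ++ [ch]) row (fun h => absurd h (by simp))]
              cases pvB_scan rest false false <;> simp [pvB_splitAux, h1, h2]

-- A's outer loop equals phase 1 + phase 2, prefixed by the rows so far.
theorem outer_eq_bodies : ∀ (n : Nat) (cs : List Char), cs.length ≤ n → ∀ (rows : List (List String)),
    pvA_outer cs rows = rows ++ (pvB_findBodies cs).map pvB_split := by
  intro n
  induction n with
  | zero =>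
    intro cs hlen rows
    have : cs = [] := List.eq_nil_of_length_eq_zero (Nat.le_zero.mp hlen)
    subst this; simp [pvA_outer, pvB_findBodies]
  | succ n ih =>
    intro cs hlen rows
    match cs with
    | [] => simp [pvA_outer, pvB_findBodies]
    | ch :: rest =>
      simp only [pvA_outer, pvB_findBodies]
      by_cases hch : ch = '('
      · simp only [hch, if_true]
        rw [inner_eq_scan_split rest false false [] [] (fun h => absurd h (by simp))]
        cases hs : pvB_scan rest false false with
        | none => simp
        | some p =>
          obtain ⟨b, r⟩ := p
          have hr : r.length ≤ n := by
            have := pvB_scan_length rest false false b r hs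
            simp at hlen; omega
          simp only [Option.map]
          rw [ih r hr]
          simp [pvB_split]
      · simp only [if_neg hch]
        exact ih rest (by simp at hlen; omega) rows

-- ===== VERDICT (by name: the statement is the Claim_ definition above) =====
theorem parse_insert_values_blob_spec : Claim_equal_parse_insert_values_blob := by
  intro blob _
  unfold Spec_parse_insert_values_blob parse_insert_values_blob parse_insert_values_blob_alt
  simpa using outer_eq_bodies blob.toList.length blob.toList le_rfl []
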